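-- pv_equiv track=rewrite | github.com/mtweiden/hybrid_partitioning | topology.py | best_line_kernel
-- ===== SOURCE A (Python) =====
-- from typing import Any, Dict, Sequence, Tuple
--
-- def best_line_kernel(op_set, freqs) -> Sequence[tuple[int]]:
-- 	edges = sorted(list(op_set), key=lambda x: freqs[x], reverse=True)
-- 	kernel_edges = []
-- 	if len(edges) < 3:
-- 		return edges
-- 	else:
-- 		used_qudits = set([])
-- 		for i in range(2):
-- 			kernel_edges.append(edges[i])
-- 			used_qudits.add(edges[i][0])
-- 			used_qudits.add(edges[i][1])
-- 		for i in range(2,len(edges)):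
-- 			if edges[i][0] in used_qudits and edges[i][1] in used_qudits:
-- 				if len(kernel_edges) == 2 and len(used_qudits) == 4:
-- 					kernel_edges.append(edges[i])
-- 					break
-- 			else:
-- 				kernel_edges.append(edges[i])
-- 				break
--
-- 		return kernel_edges
-- ===== SOURCE B (Python) =====
-- def _pop_best(edges, freqs):
--     # remove and return the first edge with maximal frequency (stable selection step)
--     best = 0
--     for i in range(1, len(edges)):
--         if freqs[edges[i]] > freqs[edges[best]]:
--             best = i
--     return edges.pop(best)
--
-- def best_line_kernel(op_set, freqs):
--     rest = list(op_set)
--     if len(rest) < 3: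
--         out = []
--         while rest:
--             out.append(_pop_best(rest, freqs))
--         return out
--     e0 = _pop_best(rest, freqs)
--     e1 = _pop_best(rest, freqs)
--     used = {e0[0], e0[1], e1[0], e1[1]}
--     if len(used) == 4:
--         return [e0, e1, _pop_best(rest, freqs)]
--     cands = [e for e in rest if e[0] not in used or e[1] not in used]
--     if cands:
--         return [e0, e1, _pop_best(cands, freqs)]
--     return [e0, e1]
-- ===== Notes on version B (the rewrite author's own statement) =====
-- stated objective: alternative
-- what changed: B never sorts: it pops the top-frequency edge by stable linear selection (at most three pops), decides the 4-qudit case on the two popped edges, and picks the third edge as the top-frequency element of the explicitly filtered fresh-endpoint candidate list, instead of A's full sort followed by a break-driven scan.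
import Mathlib
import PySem

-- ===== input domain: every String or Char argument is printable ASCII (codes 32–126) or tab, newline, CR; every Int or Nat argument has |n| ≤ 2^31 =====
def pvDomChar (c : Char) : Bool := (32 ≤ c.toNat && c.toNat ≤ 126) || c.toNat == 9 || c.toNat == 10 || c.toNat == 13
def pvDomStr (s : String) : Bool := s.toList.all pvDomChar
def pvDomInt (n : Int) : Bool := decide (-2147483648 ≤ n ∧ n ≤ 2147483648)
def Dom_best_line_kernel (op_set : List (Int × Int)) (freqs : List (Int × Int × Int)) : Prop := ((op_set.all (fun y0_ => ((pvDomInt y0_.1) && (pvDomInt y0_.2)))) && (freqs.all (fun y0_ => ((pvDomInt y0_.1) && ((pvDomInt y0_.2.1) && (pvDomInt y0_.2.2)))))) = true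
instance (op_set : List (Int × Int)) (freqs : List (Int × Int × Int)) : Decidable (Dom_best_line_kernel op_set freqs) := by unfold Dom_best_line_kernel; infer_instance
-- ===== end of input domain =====

-- B replaces A's full sort + break-driven scan by stable SELECTION of extremal edges:
-- pop the top-frequency edge (at most three times), and pick the third edge as the
-- top-frequency element of the filtered candidate list — no sort at all (objective: alternative).

-- ===== PORT A =====
-- the Python dict 'freqs' (keys are edges): built with dict overwrite semantics (shared lookup helper)
def pvDict (freqs : List (Int × Int × Int)) : PySem.Dict (Int × Int) Int :=
  PySem.Dict.ofList (freqs.map (fun q => ((q.1, q.2.1), q.2.2)))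

-- sorted(list(op_set), key=lambda x: freqs[x], reverse=True); lookup total via getD,
-- Pre_ guarantees every key is present
def pvSortedEdges (op_set : List (Int × Int)) (freqs : List (Int × Int × Int)) : List (Int × Int) :=
  PySem.List.sorted op_set (fun x => (pvDict freqs).getD x 0) true

-- the 'for i in range(2, len(edges))' loop with its break, iterating over edges[2:]
def pvALoop (rest : List (Int × Int)) (kernel : List (Int × Int)) (used : PySem.Set Int) : List (Int × Int) :=
  match rest with
  | [] => kernel
  | e :: t =>
    if PySem.Set.contains used e.1 && PySem.Set.contains used e.2 then
      if kernel.length == 2 && used.length == 4 then kernel ++ [e] else pvALoop t kernel used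
    else kernel ++ [e]

-- body of A after the sort, on the sorted edge list
def pvACore (edges : List (Int × Int)) : List (Int × Int) :=
  if edges.length < 3 then edges
  else
    -- for i in range(2): kernel_edges.append(edges[i]); used.add(edges[i][0]); used.add(edges[i][1])
    let init := (PySem.List.pyRange 0 2 1).foldl
      (fun (st : List (Int × Int) × PySem.Set Int) i =>
        let e := PySem.List.pyGetD edges i (0, 0)
        (st.1 ++ [e], PySem.Set.add (PySem.Set.add st.2 e.1) e.2))
      ([], PySem.Set.ofList ([] : List Int))
    pvALoop (edges.drop 2) init.1 init.2

def best_line_kernel (op_set : List (Int × Int)) (freqs : List (Int × Int × Int)) : List (Int × Int) :=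
  pvACore (pvSortedEdges op_set freqs)

-- ===== PORT B =====
-- _pop_best's 'for i in range(1, len(edges))' loop tracking the index of the best edge
def pvBestIdx (g : Int → Int) (n : Int) : Int :=
  (PySem.List.pyRange 1 n).foldl (fun b i => if g i > g b then i else b) 0

-- _pop_best(edges, freqs): find the first maximal-frequency edge and pop it (none unreachable: list nonempty)
def pvPopBest (f : (Int × Int) → Int) (edges : List (Int × Int)) : Option ((Int × Int) × List (Int × Int)) :=
  PySem.List.pop? edges (pvBestIdx (fun i => f (PySem.List.pyGetD edges i (0, 0))) (edges.length : Int))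

-- the 'while rest: out.append(_pop_best(rest, freqs))' loop (fuel = initial length)
def pvSelSort (f : (Int × Int) → Int) : Nat → List (Int × Int) → List (Int × Int)
  | 0, _ => []
  | n + 1, edges =>
    match pvPopBest f edges with
    | none => []
    | some (e, r) => e :: pvSelSort f n r

def best_line_kernel_alt (op_set : List (Int × Int)) (freqs : List (Int × Int × Int)) : List (Int × Int) :=
  let f := fun e => (pvDict freqs).getD e 0
  if op_set.length < 3 then pvSelSort f op_set.length op_set
  else
    match pvPopBest f op_set with
    | none => []  -- unreachable: op_set nonempty
    | some (e0, r1) =>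
      match pvPopBest f r1 with
      | none => []  -- unreachable
      | some (e1, r2) =>
        let used := PySem.Set.ofList [e0.1, e0.2, e1.1, e1.2]
        if used.length == 4 then
          match pvPopBest f r2 with
          | none => []  -- unreachable
          | some (e2, _) => [e0, e1, e2]
        else
          let cands := r2.filter (fun e => !(PySem.Set.contains used e.1) || !(PySem.Set.contains used e.2))
          match pvPopBest f cands with
          | none => [e0, e1]
          | some (e2, _) => [e0, e1, e2]

-- ===== PRECONDITION & SPEC =====
-- A raises KeyError when some edge of op_set is not a key of freqs; exactly those inputs are excluded
def Pre_best_line_kernel (op_set : List (Int × Int)) (freqs : List (Int × Int × Int)) : Prop :=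
  op_set.all (fun e => (pvDict freqs).contains e) = true
instance (op_set : List (Int × Int)) (freqs : List (Int × Int × Int)) : Decidable (Pre_best_line_kernel op_set freqs) := by unfold Pre_best_line_kernel; infer_instance

def pvWitness_best_line_kernel : (List (Int × Int)) × (List (Int × Int × Int)) :=
  ([(0, 1), (1, 2), (2, 3), (3, 4)], [(0, 1, 5), (1, 2, 4), (2, 3, 3), (3, 4, 2)])

def Spec_best_line_kernel (op_set : List (Int × Int)) (freqs : List (Int × Int × Int)) (out : List (Int × Int)) : Prop := out = best_line_kernel_alt op_set freqs
instance (op_set : List (Int × Int)) (freqs : List (Int × Int × Int)) (out : List (Int × Int)) : Decidable (Spec_best_line_kernel op_set freqs out) := by unfold Spec_best_line_kernel; infer_instance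

-- ===== CLAIM (what is proved, stated in full; the proofs are below) =====
def Claim_equal_best_line_kernel : Prop := ∀ (op_set : List (Int × Int)) (freqs : List (Int × Int × Int)), Dom_best_line_kernel op_set freqs → Pre_best_line_kernel op_set freqs → Spec_best_line_kernel op_set freqs (best_line_kernel op_set freqs)

-- ===== LEMMAS AND PROOFS =====

-- canonical form of A's post-sort computation (proof-side helper)
def pvACanon (edges : List (Int × Int)) : List (Int × Int) :=
  if edges.length < 3 then edges
  else
    let e0 := edges.getD 0 (0, 0)
    let e1 := edges.getD 1 (0, 0)
    let used := PySem.Set.ofList [e0.1, e0.2, e1.1, e1.2]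
    if used.length == 4 then edges.take 3
    else
      match (edges.drop 2).find?
          (fun e => !(PySem.Set.contains used e.1) || !(PySem.Set.contains used e.2)) with
      | some e => edges.take 2 ++ [e]
      | none => edges.take 2

-- when the first two edges cover 4 distinct qudits, A's loop accepts the very first edge it sees
lemma pvALoop_four (e : Int × Int) (t kernel : List (Int × Int)) (used : PySem.Set Int)
    (hk : kernel.length = 2) (h4 : used.length = 4) :
    pvALoop (e :: t) kernel used = kernel ++ [e] := by
  simp [pvALoop, hk, h4]

-- otherwise A's loop returns the first edge with a fresh endpoint (if any)
lemma pvALoop_no_four (rest kernel : List (Int × Int)) (used : PySem.Set Int)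
    (h4 : used.length ≠ 4) :
    pvALoop rest kernel used =
      kernel ++ (match rest.find?
          (fun e => !(PySem.Set.contains used e.1) || !(PySem.Set.contains used e.2)) with
        | some e => [e]
        | none => []) := by
  induction rest with
  | nil => simp [pvALoop]
  | cons e t ih =>
    by_cases h1 : e.1 ∈ used <;> by_cases h2 : e.2 ∈ used <;>
      simp [pvALoop, List.find?, h1, h2, h4, ih]

-- A's whole post-sort computation equals its canonical form
lemma pvACore_eq_canon (edges : List (Int × Int)) : pvACore edges = pvACanon edges := by
  unfold pvACore pvACanon
  by_cases hlen : edges.length < 3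
  · simp [hlen]
  · obtain ⟨e0, e1, e2, rest, hE⟩ :
        ∃ e0 e1 e2 rest, edges = e0 :: e1 :: e2 :: rest := by
      rcases edges with _ | ⟨a, _ | ⟨b, _ | ⟨c, r⟩⟩⟩
      · simp at hlen
      · simp at hlen
      · simp at hlen
      · exact ⟨a, b, c, r, rfl⟩
    subst hE
    simp only [hlen, if_false]
    have hrange : PySem.List.pyRange 0 2 1 = [0, 1] := by decide
    rw [hrange]
    simp only [List.foldl, PySem.List.pyGetD_zero_cons]
    have hnn : (0 : Int) ≤ (rest.length : Int) + 1 := by positivity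
    have h1 : PySem.List.pyGetD (e0 :: e1 :: e2 :: rest) 1 (0, 0) = e1 := by
      simp [PySem.List.pyGetD, PySem.List.pyGet?, PySem.List.pyIdx?, hnn]
    rw [h1]
    have hused : PySem.Set.add (PySem.Set.add (PySem.Set.add (PySem.Set.add
        (PySem.Set.ofList ([] : List Int)) e0.1) e0.2) e1.1) e1.2 =
        PySem.Set.ofList [e0.1, e0.2, e1.1, e1.2] := by
      rw [PySem.Set.ofList_eq_foldl]; rfl
    rw [hused]
    have hker : ([] : List (Int × Int)) ++ [e0] ++ [e1] = [e0, e1] := rfl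
    rw [hker]
    have hget0 : (e0 :: e1 :: e2 :: rest).getD 0 (0, 0) = e0 := rfl
    have hget1 : (e0 :: e1 :: e2 :: rest).getD 1 (0, 0) = e1 := rfl
    simp only [hget0, hget1]
    set used := PySem.Set.ofList [e0.1, e0.2, e1.1, e1.2] with huseddef
    by_cases h4 : used.length = 4
    · rw [show List.drop 2 (e0 :: e1 :: e2 :: rest) = e2 :: rest from rfl,
        pvALoop_four e2 rest [e0, e1] used rfl h4]
      simp [h4, List.take]
    · rw [pvALoop_no_four (List.drop 2 (e0 :: e1 :: e2 :: rest)) [e0, e1] used h4]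
      have hb : (used.length == 4) = false := by simpa using h4
      simp only [hb]
      cases (List.drop 2 (e0 :: e1 :: e2 :: rest)).find?
          (fun e => !(PySem.Set.contains used e.1) || !(PySem.Set.contains used e.2)) <;>
        simp [List.take]

-- ===== stable-sort-as-selection lemmas =====

-- appending an element to the input inserts it into the sorted output
lemma pvSorted_concat {α : Type} (f : α → Int) (xs : List α) (x : α) :
    PySem.List.sorted (xs ++ [x]) f true =
      PySem.List.insertBy (fun a b => decide (f b < f a)) x (PySem.List.sorted xs f true) := by
  simp [PySem.List.sorted, List.foldl_append]

-- an element strictly above everything goes to the front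
lemma pvInsertBy_front {α : Type} (f : α → Int) (x : α) (ys : List α)
    (h : ∀ y ∈ ys, f y < f x) :
    PySem.List.insertBy (fun a b => decide (f b < f a)) x ys = x :: ys := by
  cases ys with
  | nil => simp [PySem.List.insertBy]
  | cons y t => simp [PySem.List.insertBy, h y (List.mem_cons_self)]

-- an element not above the head is inserted past it
lemma pvInsertBy_skip {α : Type} (f : α → Int) (x m : α) (t : List α)
    (h : ¬ f m < f x) :
    PySem.List.insertBy (fun a b => decide (f b < f a)) x (m :: t) =
      m :: PySem.List.insertBy (fun a b => decide (f b < f a)) x t := by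
  simp [PySem.List.insertBy, h]

-- SELECTION STEP: the stable descending sort starts with the first maximal element
lemma pvSorted_sel {α : Type} (f : α → Int) (r l : List α) (m : α)
    (hl : ∀ y ∈ l, f y < f m) (hr : ∀ y ∈ r, f y ≤ f m) :
    PySem.List.sorted (l ++ m :: r) f true = m :: PySem.List.sorted (l ++ r) f true := by
  induction r using List.reverseRecOn with
  | nil =>
    rw [show l ++ [m] = l ++ [m] from rfl, pvSorted_concat]
    rw [pvInsertBy_front f m _ (fun y hy => hl y ((PySem.List.mem_sorted _ _ _ _).1 hy))]
    simp
  | append_singleton r x ih =>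
    have hx : f x ≤ f m := hr x (by simp)
    have hshift : l ++ m :: (r ++ [x]) = (l ++ m :: r) ++ [x] := by simp
    rw [hshift, pvSorted_concat, ih (fun y hy => hr y (by simp [hy])),
      pvInsertBy_skip f x m _ (by omega)]
    have hshift2 : l ++ (r ++ [x]) = (l ++ r) ++ [x] := by simp
    rw [hshift2, pvSorted_concat]

-- filtering commutes with inserting into a descending-sorted list
lemma pvFilter_insertBy {α : Type} (f : α → Int) (p : α → Bool) (x : α) (ys : List α)
    (hp : ys.Pairwise (fun a b => f b ≤ f a)) :
    (PySem.List.insertBy (fun a b => decide (f b < f a)) x ys).filter p =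
      if p x then PySem.List.insertBy (fun a b => decide (f b < f a)) x (ys.filter p)
      else ys.filter p := by
  induction ys with
  | nil => cases hpx : p x <;> simp [PySem.List.insertBy, List.filter, hpx]
  | cons y t ih =>
    rcases List.pairwise_cons.1 hp with ⟨hyt, ht⟩
    by_cases hxy : f y < f x
    · rw [show PySem.List.insertBy (fun a b => decide (f b < f a)) x (y :: t) = x :: y :: t by
        simp [PySem.List.insertBy, hxy]]
      cases hpx : p x with
      | false => simp [List.filter_cons, hpx]
      | true =>
        have hfront : ∀ z ∈ (y :: t).filter p, f z < f x := by
          intro z hz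
          rcases List.mem_cons.1 (List.mem_of_mem_filter hz) with h | h
          · exact h ▸ hxy
          · exact lt_of_le_of_lt (hyt z h) hxy
        rw [pvInsertBy_front f x _ hfront]
        simp [List.filter_cons, hpx]
    · rw [pvInsertBy_skip f x y t hxy]
      by_cases hpy : p y = true
      · rw [List.filter_cons_of_pos hpy, List.filter_cons_of_pos hpy, ih ht,
          pvInsertBy_skip f x y _ hxy]
        by_cases hpx : p x = true <;> simp [hpx]
      · rw [List.filter_cons_of_neg (by simp [hpy]), List.filter_cons_of_neg (by simp [hpy])]
        exact ih ht

-- filtering commutes with the stable descending sort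
lemma pvSorted_filter {α : Type} (f : α → Int) (p : α → Bool) (xs : List α) :
    (PySem.List.sorted xs f true).filter p = PySem.List.sorted (xs.filter p) f true := by
  induction xs using List.reverseRecOn with
  | nil => rfl
  | append_singleton r x ih =>
    rw [pvSorted_concat, pvFilter_insertBy f p x _ (PySem.List.sorted_pairwise_rev r f), ih,
      List.filter_append]
    cases hpx : p x with
    | false => simp [List.filter, hpx]
    | true =>
      rw [show (List.filter p [x]) = [x] by simp [List.filter, hpx], pvSorted_concat]
      simp

-- ===== the selection loop of B finds the first maximal index =====

lemma pvBestIdx_spec (g : Int → Int) (n : Nat) :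
    ∃ k : Nat, pvBestIdx g (n : Int) = (k : Int) ∧ k < max n 1 ∧
      (∀ j : Nat, j < k → g j < g k) ∧ (∀ j : Nat, j < n → g j ≤ g k) := by
  induction n with
  | zero =>
    refine ⟨0, ?_, by omega, by omega, by omega⟩
    rw [pvBestIdx, show PySem.List.pyRange 1 ((0 : Nat) : Int) = [] from by decide]
    rfl
  | succ n ih =>
    rcases Nat.eq_zero_or_pos n with h0 | hpos
    · subst h0
      refine ⟨0, ?_, by omega, by omega, ?_⟩
      · rw [pvBestIdx, show PySem.List.pyRange 1 ((1 : Nat) : Int) = [] from by decide]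
        rfl
      · intro j hj
        interval_cases j
        exact le_refl _
    · obtain ⟨k, hfold, hklt, hstrict, hle⟩ := ih
      have hcast : ((n + 1 : Nat) : Int) = (n : Int) + 1 := by push_cast; ring
      have hrange : PySem.List.pyRange 1 ((n + 1 : Nat) : Int) =
          PySem.List.pyRange 1 (n : Int) ++ [(n : Int)] := by
        rw [hcast, PySem.List.pyRange_one_succ_right (by exact_mod_cast hpos)]
      rw [pvBestIdx, hrange, List.foldl_append]
      rw [show (PySem.List.pyRange 1 (n : Int)).foldl
        (fun b i => if g i > g b then i else b) 0 = pvBestIdx g (n : Int) from rfl, hfold]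
      simp only [List.foldl]
      by_cases hgt : g (n : Int) > g (k : Int)
      · refine ⟨n, by simp [hgt], by omega, ?_, ?_⟩
        · intro j hj
          exact lt_of_le_of_lt (hle j hj) hgt
        · intro j hj
          rcases Nat.lt_succ_iff_lt_or_eq.1 hj with h | h
          · exact le_of_lt (lt_of_le_of_lt (hle j h) hgt)
          · subst h; exact le_refl _
      · refine ⟨k, by simp [hgt], by omega, hstrict, ?_⟩
        intro j hj
        rcases Nat.lt_succ_iff_lt_or_eq.1 hj with h | h
        · exact hle j h
        · subst h; omega

-- _pop_best removes the first maximal element and returns it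
lemma pvPopBest_spec (f : (Int × Int) → Int) (xs : List (Int × Int)) (hne : xs ≠ []) :
    ∃ (k : Nat) (hk : k < xs.length),
      pvPopBest f xs = some (xs[k], xs.take k ++ xs.drop (k + 1)) ∧
      (∀ y ∈ xs.take k, f y < f xs[k]) ∧ (∀ y ∈ xs.drop (k + 1), f y ≤ f xs[k]) := by
  obtain ⟨k, hfold, hklt, hstrict, hle⟩ :=
    pvBestIdx_spec (fun i => f (PySem.List.pyGetD xs i (0, 0))) xs.length
  have hlen : 1 ≤ xs.length := by
    cases xs with
    | nil => exact absurd rfl hne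
    | cons a t => simp
  have hk : k < xs.length := by omega
  have hgd : ∀ (j : Nat) (hj : j < xs.length),
      f (PySem.List.pyGetD xs ((j : Nat) : Int) (0, 0)) = f xs[j] := by
    intro j hj
    rw [PySem.List.pyGetD_natCast, List.getD_eq_getElem _ _ hj]
  refine ⟨k, hk, ?_, ?_, ?_⟩
  · rw [pvPopBest, hfold, PySem.List.pop?_natCast xs k hk,
      List.eraseIdx_eq_take_drop_succ]
  · intro y hy
    obtain ⟨j, hj, hyj⟩ := List.mem_iff_getElem.1 hy
    have hjk : j < k := by
      have : (xs.take k).length = k := by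
        rw [List.length_take]; omega
      omega
    have hjlen : j < xs.length := by omega
    have : y = xs[j] := by
      rw [← hyj, List.getElem_take]
    rw [this]
    have := hstrict j hjk
    rwa [hgd j hjlen, hgd k hk] at this
  · intro y hy
    obtain ⟨j, hj, hyj⟩ := List.mem_iff_getElem.1 hy
    have hjlen : k + 1 + j < xs.length := by
      have : (xs.drop (k + 1)).length = xs.length - (k + 1) := by rw [List.length_drop]
      omega
    have : y = xs[k + 1 + j] := by
      rw [← hyj, List.getElem_drop]
    rw [this]
    have := hle (k + 1 + j) hjlen
    rwa [hgd (k + 1 + j) hjlen, hgd k hk] at this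

-- _pop_best performs one selection-sort step of the stable descending sort
lemma pvPopBest_sorted (f : (Int × Int) → Int) (xs : List (Int × Int)) (hne : xs ≠ []) :
    ∃ e r, pvPopBest f xs = some (e, r) ∧
      PySem.List.sorted xs f true = e :: PySem.List.sorted r f true ∧
      r.length + 1 = xs.length := by
  obtain ⟨k, hk, hpop, hstrict, hle⟩ := pvPopBest_spec f xs hne
  refine ⟨xs[k], xs.take k ++ xs.drop (k + 1), hpop, ?_, ?_⟩
  · conv_lhs => rw [show xs = xs.take k ++ xs.drop k from (List.take_append_drop k xs).symm,
      List.drop_eq_getElem_cons hk]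
    exact pvSorted_sel f (xs.drop (k + 1)) (xs.take k) xs[k] hstrict hle
  · rw [List.length_append, List.length_take, List.length_drop]
    omega

-- the 'while rest' pop loop IS the stable descending sort
lemma pvSelSort_eq (f : (Int × Int) → Int) :
    ∀ (n : Nat) (xs : List (Int × Int)), xs.length = n →
      pvSelSort f n xs = PySem.List.sorted xs f true := by
  intro n
  induction n with
  | zero =>
    intro xs hxs
    rw [List.length_eq_zero_iff.1 hxs]
    rfl
  | succ n ih =>
    intro xs hxs
    have hne : xs ≠ [] := by
      intro h; rw [h] at hxs; simp at hxs
    obtain ⟨e, r, hpop, hs, hl⟩ := pvPopBest_sorted f xs hne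
    rw [pvSelSort, hpop, hs]
    show e :: pvSelSort f n r = e :: PySem.List.sorted r f true
    rw [ih r (by omega)]

lemma pvPopBest_nil (f : (Int × Int) → Int) : pvPopBest f [] = none := by
  rw [pvPopBest, show pvBestIdx (fun i => f (PySem.List.pyGetD [] i (0, 0)))
    ((List.length ([] : List (Int × Int)) : Int)) = 0 from by
      rw [pvBestIdx]
      rw [show PySem.List.pyRange 1 ((List.length ([] : List (Int × Int))) : Int) = []
        from by decide]
      rfl]
  rfl

-- B's whole computation equals A's canonical form applied to the sorted list
lemma pvCanon_eq_alt (op_set : List (Int × Int)) (freqs : List (Int × Int × Int)) :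
    pvACanon (pvSortedEdges op_set freqs) = best_line_kernel_alt op_set freqs := by
  set f := fun e => (pvDict freqs).getD e 0 with hf
  have hSdef : pvSortedEdges op_set freqs = PySem.List.sorted op_set f true := rfl
  have hSlen : (pvSortedEdges op_set freqs).length = op_set.length := by
    rw [hSdef, PySem.List.length_sorted]
  by_cases hlen : op_set.length < 3
  · rw [best_line_kernel_alt]
    simp only [if_pos hlen]
    rw [pvACanon, if_pos (by omega), hSdef, pvSelSort_eq f op_set.length op_set rfl]
  · have hne : op_set ≠ [] := by
      intro h; rw [h] at hlen; simp at hlen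
    obtain ⟨e0, r1, hp1, hs1, hl1⟩ := pvPopBest_sorted f op_set hne
    have hr1ne : r1 ≠ [] := by
      intro h; rw [h] at hl1; simp at hl1; omega
    obtain ⟨e1, r2, hp2, hs2, hl2⟩ := pvPopBest_sorted f r1 hr1ne
    have hr2ne : r2 ≠ [] := by
      intro h; rw [h] at hl2; simp at hl2; omega
    have hS : pvSortedEdges op_set freqs = e0 :: e1 :: PySem.List.sorted r2 f true := by
      rw [hSdef, hs1, hs2]
    rw [best_line_kernel_alt]
    simp only [if_neg hlen]
    rw [← hf]
    simp only [hp1, hp2]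
    rw [hS, pvACanon]
    have h3 : ¬ (e0 :: e1 :: PySem.List.sorted r2 f true).length < 3 := by
      simp
      omega
    simp only [if_neg h3]
    have hget0 : (e0 :: e1 :: PySem.List.sorted r2 f true).getD 0 (0, 0) = e0 := rfl
    have hget1 : (e0 :: e1 :: PySem.List.sorted r2 f true).getD 1 (0, 0) = e1 := rfl
    simp only [hget0, hget1]
    set used := PySem.Set.ofList [e0.1, e0.2, e1.1, e1.2] with hused
    by_cases h4 : used.length = 4
    · obtain ⟨e2, r3, hp3, hs3, _⟩ := pvPopBest_sorted f r2 hr2ne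
      rw [hs3]
      simp only [h4, hp3]
      simp [List.take]
    · have hb4 : (used.length == 4) = false := by simpa using h4
      simp only [hb4, Bool.false_eq_true, if_false]
      rw [show (e0 :: e1 :: PySem.List.sorted r2 f true).drop 2 =
        PySem.List.sorted r2 f true from rfl]
      set p := fun e : Int × Int =>
        !(PySem.Set.contains used e.1) || !(PySem.Set.contains used e.2) with hpdef
      rw [← List.head?_filter, pvSorted_filter]
      by_cases hc : r2.filter p = []
      · rw [hc, pvPopBest_nil,
          show PySem.List.sorted ([] : List (Int × Int)) f true = [] from rfl]
        simp [List.take]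
      · obtain ⟨e2, r, hp3, hs3, _⟩ := pvPopBest_sorted f (r2.filter p) hc
        rw [hs3]
        simp only [hp3]
        simp [List.take]
  
-- ===== VERDICT (by name: the statement is the Claim_ definition above) =====
theorem best_line_kernel_spec : Claim_equal_best_line_kernel := by
  intro op_set freqs _ _
  unfold Spec_best_line_kernel best_line_kernel
  rw [pvACore_eq_canon, pvCanon_eq_alt]
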